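-- pv_equiv track=rewrite | github.com/bobthechemist/talos-sdl | host/ai/live_view_manager.py | parse_field_spec
-- ===== SOURCE A (Python) =====
-- def parse_field_spec(spec):
--     """
--     Parse a field specification string
--
--     Args:
--         spec: String like 'hmc5883.x' or 'hmc5883.x, hmc5883.y' or 'hmc5883.x hmc5883.y'
--
--     Returns:
--         List of field specifications (e.g., ['hmc5883.x', 'hmc5883.y'])
--     """
--     if not spec:
--         return []
--
--     # First split by comma
--     parts = spec.split(',')
--     result = []
--     for part in parts:
--         # Then split each part by whitespace and add non-empty items
--         result.extend([p.strip() for p in part.split() if p.strip()])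
--     return result
-- ===== SOURCE B (Python) =====
-- def parse_field_spec(spec):
--     if not spec:
--         return []
--     tokens = []
--     cur = []
--     for ch in spec:
--         if ch == ',' or ch.isspace():
--             if cur:
--                 tokens.append(''.join(cur))
--                 cur = []
--         else:
--             cur.append(ch)
--     if cur:
--         tokens.append(''.join(cur))
--     return tokens
-- ===== Notes on version B (the rewrite author's own statement) =====
-- stated objective: alternative
-- what changed: Replaced A's staged library splits (split on commas, then per-part whitespace split with strip/filter/extend) by a single character-level state machine: one pass over the string that accumulates the current token and flushes it whenever a comma or whitespace character is seen.
import Mathlib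
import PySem

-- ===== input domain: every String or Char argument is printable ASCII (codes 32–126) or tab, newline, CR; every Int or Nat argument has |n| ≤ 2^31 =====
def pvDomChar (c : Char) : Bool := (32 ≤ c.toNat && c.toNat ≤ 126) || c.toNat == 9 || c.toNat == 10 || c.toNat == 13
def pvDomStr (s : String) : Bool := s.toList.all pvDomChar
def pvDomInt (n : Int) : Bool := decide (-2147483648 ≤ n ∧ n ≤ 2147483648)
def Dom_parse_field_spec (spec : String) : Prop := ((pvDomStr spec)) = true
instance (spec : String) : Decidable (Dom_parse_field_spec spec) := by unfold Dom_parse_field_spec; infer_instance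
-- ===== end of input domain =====

-- B replaces A's staged library splits by a single character-level state machine
-- (one pass, current-token accumulator flushed at ',' or whitespace); same cost, alternative algorithm.

-- ===== PORT A =====
def parse_field_spec (spec : String) : List String :=
  if spec = "" then []
  else
    let parts := (PySem.Str.split? spec ",").getD []
    parts.foldl (fun result part =>
      result ++ ((PySem.Str.split₀ part).filter
        (fun p => PySem.Str.strip p != "")).map PySem.Str.strip) []

-- ===== PORT B =====
def parse_field_spec_alt (spec : String) : List String :=
  if spec = "" then []
  else
    let st := spec.toList.foldl
      (fun (st : List String × List Char) ch =>
        if ch = ',' || PySem.Chars.isspace ch then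
          if st.2.isEmpty then st else (st.1 ++ [String.ofList st.2], [])
        else (st.1, st.2 ++ [ch]))
      ([], [])
    if st.2.isEmpty then st.1 else st.1 ++ [String.ofList st.2]

-- ===== PRECONDITION & SPEC =====
def Spec_parse_field_spec (spec : String) (out : List String) : Prop := out = parse_field_spec_alt spec
instance (spec : String) (out : List String) : Decidable (Spec_parse_field_spec spec out) := by unfold Spec_parse_field_spec; infer_instance

-- ===== CLAIM (what is proved, stated in full; the proofs are below) =====
def Claim_equal_parse_field_spec : Prop := ∀ (spec : String), Dom_parse_field_spec spec → Spec_parse_field_spec spec (parse_field_spec spec)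

-- ===== LEMMAS AND PROOFS =====

/-- Whitespace-splitting with a reversed-current-token accumulator (structural form of `Chars.split₀.go`). -/
def pvGoT (p : Char → Bool) : List Char → List Char → List (List Char)
  | [], cur => if cur.isEmpty then [] else [cur.reverse]
  | c :: rest, cur =>
      if p c then (if cur.isEmpty then pvGoT p rest [] else cur.reverse :: pvGoT p rest [])
      else pvGoT p rest (c :: cur)

/-- Comma-splitting (keeping empties) with a reversed-current accumulator (structural form of `Chars.splitOn.go` for sep ','). -/
def pvGoC : List Char → List Char → List (List Char)
  | [], cur => [cur.reverse]
  | c :: rest, cur => if c = ',' then cur.reverse :: pvGoC rest [] else pvGoC rest (c :: cur)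

def pvP (c : Char) : Bool := PySem.Chars.isspace c || c = ','

theorem pvGoT_spec (s cur : List Char) (accs : List (List Char)) :
    PySem.Chars.split₀.go s cur accs = accs.reverse ++ pvGoT PySem.Chars.isspace s cur := by
  induction s generalizing cur accs with
  | nil => simp [PySem.Chars.split₀.go, pvGoT]; split_ifs <;> simp
  | cons c rest ih =>
      simp only [PySem.Chars.split₀.go, pvGoT]
      split_ifs <;> simp [ih]

theorem pvGoC_spec (fuel : Nat) (s cur : List Char) (accs : List (List Char))
    (h : s.length ≤ fuel) :
    PySem.Chars.splitOn.go [','] fuel s cur accs = accs.reverse ++ pvGoC s cur := by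
  induction fuel generalizing s cur accs with
  | zero =>
      have : s = [] := by cases s <;> simp_all
      subst this; simp [PySem.Chars.splitOn.go, pvGoC]
  | succ fuel ih =>
      cases s with
      | nil => simp [PySem.Chars.splitOn.go, pvGoC]
      | cons c rest =>
          simp only [PySem.Chars.splitOn.go, pvGoC]
          by_cases hc : c = ','
          · subst hc
            simp only [List.isPrefixOf, List.length_cons] at h ⊢
            simp [ih rest [] _ (by omega)]
          · have hp : List.isPrefixOf [','] (c :: rest) = false := by
              simp [List.isPrefixOf]; exact fun h' => (hc h'.symm).elim
            simp only [List.length_cons] at h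
            simp [hp, hc, ih rest (c :: cur) accs (by omega)]

/-- `pvGoC` with a pending current token prepends it to the head part. -/
theorem pvGoC_head (s cur : List Char) :
    pvGoC s cur = (cur.reverse ++ (pvGoC s []).head!) :: (pvGoC s []).tail := by
  induction s generalizing cur with
  | nil => simp [pvGoC]
  | cons c rest ih =>
      by_cases hc : c = ','
      · subst hc; simp [pvGoC]
      · simp only [pvGoC, if_neg hc]
        rw [ih (c :: cur), ih [c]]
        simp

/-- Master lemma: whitespace-splitting each comma part and concatenating equals splitting on the union predicate. -/
theorem pvMaster (s : List Char) (d : List Char) :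
    pvGoT PySem.Chars.isspace ((pvGoC s []).head!) d
      ++ ((pvGoC s []).tail).flatMap (fun w => pvGoT PySem.Chars.isspace w []) =
    pvGoT pvP s d := by
  induction s generalizing d with
  | nil => cases d <;> simp [pvGoC, pvGoT]
  | cons c rest ih =>
      by_cases hc : c = ','
      · subst hc
        have hrest : (pvGoC rest []).flatMap (fun w => pvGoT PySem.Chars.isspace w []) =
            pvGoT pvP rest [] := by
          rw [pvGoC_head rest []]; simp [List.flatMap_cons]; exact ih []
        simp only [pvGoC, List.reverse_nil, List.head!, List.tail, pvGoT]
        have hP : pvP ',' = true := by simp [pvP]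
        cases d with
        | nil => simp [pvGoT, hrest, hP]
        | cons a as => simp [pvGoT, hrest, hP]
      · have hhead : pvGoC (c :: rest) [] = (c :: (pvGoC rest []).head!) :: (pvGoC rest []).tail := by
          simp only [pvGoC, if_neg hc]; rw [pvGoC_head rest [c]]; simp
        rw [hhead]
        simp only [List.head!, List.tail]
        by_cases hs : PySem.Chars.isspace c = true
        · have hP : pvP c = true := by simp [pvP, hs]
          simp only [pvGoT, hs, hP]
          have hrest : (pvGoT PySem.Chars.isspace ((pvGoC rest []).head!) [])
              ++ ((pvGoC rest []).tail).flatMap (fun w => pvGoT PySem.Chars.isspace w []) =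
              pvGoT pvP rest [] := ih []
          cases d with
          | nil => simpa using hrest
          | cons a as => simpa using hrest
        · have hP : pvP c = false := by
            simp [pvP, hc]; simpa using hs
          simp only [pvGoT, hs, hP, Bool.false_eq_true, if_false]
          exact ih (c :: d)

/-- Every token produced by `pvGoT isspace` from a whitespace-free pending token is nonempty and whitespace-free. -/
theorem pvGoT_tokens (s : List Char) (cur : List Char)
    (hcur : ∀ c ∈ cur, PySem.Chars.isspace c = false) :
    ∀ t ∈ pvGoT PySem.Chars.isspace s cur, t ≠ [] ∧ ∀ c ∈ t, PySem.Chars.isspace c = false := by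
  induction s generalizing cur with
  | nil =>
      intro t ht
      simp only [pvGoT] at ht
      split_ifs at ht with h
      · simp at ht
      · simp at ht
        subst ht
        refine ⟨by simpa using fun h' => h (by simp [h']), ?_⟩
        intro c hc; exact hcur c (by simpa using hc)
  | cons c rest ih =>
      intro t ht
      simp only [pvGoT] at ht
      split_ifs at ht with h1 h2
      · exact ih [] (by simp) t ht
      · rcases List.mem_cons.mp ht with h | h
        · subst h
          refine ⟨by simpa using fun h' => h2 (by simp [h']), ?_⟩
          intro a ha; exact hcur a (by simpa using ha)
        · exact ih [] (by simp) t h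
      · refine ih (c :: cur) ?_ t ht
        intro a ha
        rcases List.mem_cons.mp ha with h | h
        · subst h; simpa using h1
        · exact hcur a h

theorem pvStrip_id (t : List Char) (h : ∀ c ∈ t, PySem.Chars.isspace c = false) :
    PySem.Chars.strip t = t := by
  have hl : PySem.Chars.lstrip t = t := by
    unfold PySem.Chars.lstrip
    cases t with
    | nil => simp
    | cons c rest => simp [h c (by simp)]
  have hr : PySem.Chars.rstrip t = t := by
    unfold PySem.Chars.rstrip
    cases ht : t.reverse with
    | nil => simpa using congrArg List.reverse ht
    | cons c rest =>
        have hc : PySem.Chars.isspace c = false := h c (by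
          have : c ∈ t.reverse := by simp [ht]
          simpa using this)
        have hd : List.dropWhile PySem.Chars.isspace (c :: rest) = c :: rest := by
          simp [hc]
        rw [hd, List.reverse_eq_iff]
        exact ht.symm
  simp [PySem.Chars.strip, hl, hr]

/-- A's per-part comprehension is just `split₀` of the part: tokens are nonempty and whitespace-free. -/
theorem pvPart_simp (w : List Char) :
    ((PySem.Str.split₀ (String.ofList w)).filter
        (fun p => PySem.Str.strip p != "")).map PySem.Str.strip =
      (pvGoT PySem.Chars.isspace w []).map String.ofList := by
  have hsplit : PySem.Str.split₀ (String.ofList w) =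
      (pvGoT PySem.Chars.isspace w []).map String.ofList := by
    simp [PySem.Str.split₀, PySem.Chars.split₀, pvGoT_spec w [] []]
  rw [hsplit, List.filter_map, List.map_map]
  have htok := pvGoT_tokens w [] (by simp)
  rw [List.filter_eq_self.mpr, List.map_congr_left]
  · intro t ht
    have h := htok t ht
    simp [Function.comp, PySem.Str.strip, pvStrip_id t h.2]
  · intro t ht
    have h := htok t (by simpa using ht)
    have : PySem.Str.strip (String.ofList t) = String.ofList t := by
      simp [PySem.Str.strip, pvStrip_id t h.2]
    simp [Function.comp, this]
    exact h.1

theorem pvSplitOn_eq (s : List Char) : PySem.Chars.splitOn s [','] = pvGoC s [] := by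
  simp [PySem.Chars.splitOn, pvGoC_spec (s.length + 1) s [] [] (by omega)]

/-- B's state function and final flush, named for the proof. -/
def pvStep (st : List String × List Char) (ch : Char) : List String × List Char :=
  if ch = ',' || PySem.Chars.isspace ch then
    if st.2.isEmpty then st else (st.1 ++ [String.ofList st.2], [])
  else (st.1, st.2 ++ [ch])

def pvFinish (st : List String × List Char) : List String :=
  if st.2.isEmpty then st.1 else st.1 ++ [String.ofList st.2]

theorem pvP_step (c : Char) : (c = ',' || PySem.Chars.isspace c) = pvP c := by
  simp [pvP, Bool.or_comm]

/-- B's state-machine fold, followed by its final flush, is `pvGoT pvP` of the suffix. -/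
theorem pvFoldB (s : List Char) (toks : List String) (cur : List Char) :
    pvFinish (s.foldl pvStep (toks, cur)) =
      toks ++ (pvGoT pvP s cur.reverse).map String.ofList := by
  induction s generalizing toks cur with
  | nil =>
      simp only [List.foldl_nil, pvFinish, pvGoT]
      by_cases h : cur.isEmpty
      · simp_all
      · have : cur.reverse.isEmpty = false := by simp_all
        simp [h, this]
  | cons c rest ih =>
      simp only [List.foldl_cons]
      by_cases hP : pvP c = true
      · have hp : (c = ',' || PySem.Chars.isspace c) = true := by rw [pvP_step]; exact hP
        by_cases hc : cur.isEmpty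
        · have hnil : cur = [] := by simpa using hc
          subst hnil
          simp only [pvStep, hp, if_true, List.isEmpty_nil, pvGoT, hP, List.reverse_nil]
          exact ih toks []
        · have hcr : cur.reverse.isEmpty = false := by simp_all
          have hcb : cur.isEmpty = false := by simpa using hc
          simp only [pvStep, hp, if_true, hcb, Bool.false_eq_true, if_false, pvGoT, hP, hcr]
          rw [ih (toks ++ [String.ofList cur]) []]
          simp
      · have hp : (c = ',' || PySem.Chars.isspace c) = false := by
          rw [pvP_step]; simpa using hP
        simp only [pvStep, hp, Bool.false_eq_true, if_false, pvGoT, hP]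
        rw [ih toks (cur ++ [c])]
        simp

-- ===== VERDICT (by name: the statement is the Claim_ definition above) =====
theorem parse_field_spec_spec : Claim_equal_parse_field_spec := by
  intro spec _
  unfold Spec_parse_field_spec parse_field_spec parse_field_spec_alt
  by_cases h : spec = ""
  · simp [h]
  · simp only [if_neg h]
    rw [PySem.List.foldl_append_eq_flatMap, List.nil_append]
    have hparts : (PySem.Str.split? spec ",").getD [] =
        (pvGoC spec.toList []).map String.ofList := by
      have hsep : (",").toList = [','] := rfl
      simp [PySem.Str.split?, PySem.Chars.split?, hsep, pvSplitOn_eq]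
    rw [hparts, List.flatMap_map]
    have hfun : (fun w => ((PySem.Str.split₀ (String.ofList w)).filter
          (fun p => PySem.Str.strip p != "")).map PySem.Str.strip) =
        (fun w => (pvGoT PySem.Chars.isspace w []).map String.ofList) :=
      funext pvPart_simp
    have hA : (pvGoC spec.toList []).flatMap
        (fun w => ((PySem.Str.split₀ (String.ofList w)).filter
          (fun p => PySem.Str.strip p != "")).map PySem.Str.strip) =
        ((pvGoC spec.toList []).flatMap
          (fun w => pvGoT PySem.Chars.isspace w [])).map String.ofList := by
      rw [hfun, List.map_flatMap]
    have hM : (pvGoC spec.toList []).flatMap (fun w => pvGoT PySem.Chars.isspace w []) =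
        pvGoT pvP spec.toList [] := by
      rw [pvGoC_head spec.toList []]
      simp only [List.flatMap_cons, List.reverse_nil, List.nil_append]
      exact pvMaster spec.toList []
    rw [hA, hM]
    show List.map String.ofList (pvGoT pvP spec.toList []) =
      pvFinish (spec.toList.foldl pvStep ([], []))
    rw [pvFoldB spec.toList [] []]
    simp
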